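-- pv_equiv track=rewrite | github.com/Krithik-Kesh/Poetry-Checker | poetry_functions.py | get_rhyme_label_to_lines
-- ===== SOURCE A (Python) =====
-- def get_rhyme_label_to_lines(rhyme_scheme: tuple[str, ...]
--                              ) -> dict[str, list[int]]:
--     """Return a dictionary where each key is an item in rhyme_scheme and
--     its corresponding value is a list of the indexes in rhyme_scheme where
--     the item appears.
--
--     >>> result = get_rhyme_label_to_lines(('A', 'A', 'B', 'B', 'A'))
--     >>> expected = {'A': [0, 1, 4], 'B': [2, 3]}
--     >>> expected == result
--     True
--     >>> result = get_rhyme_label_to_lines(('*', '*', '*', '*', '*'))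
--     >>> expected = {'*': [0, 1, 2, 3, 4]}
--     >>> expected == result
--     True
--     """
--     labels = {}
--     for i in range(len(rhyme_scheme)):
--         label = rhyme_scheme[i]
--         if label not in labels:
--             labels[label] = []
--         labels[label].append(i)
--
--     return labels
-- ===== SOURCE B (Python) =====
-- def get_rhyme_label_to_lines(rhyme_scheme):
--     """Group indices by label: for each distinct label (in first-occurrence
--     order), collect the indices where it appears by scanning enumerate()."""
--     return {label: [i for i, x in enumerate(rhyme_scheme) if x == label]
--             for label in dict.fromkeys(rhyme_scheme)}
-- ===== Notes on version B (the rewrite author's own statement) =====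
-- stated objective: alternative
-- what changed: Replaces the incremental dict-insert/append loop with a per-label construction: dedup the labels in first-occurrence order, then one enumerate-scan comprehension per distinct label.
import Mathlib
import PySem

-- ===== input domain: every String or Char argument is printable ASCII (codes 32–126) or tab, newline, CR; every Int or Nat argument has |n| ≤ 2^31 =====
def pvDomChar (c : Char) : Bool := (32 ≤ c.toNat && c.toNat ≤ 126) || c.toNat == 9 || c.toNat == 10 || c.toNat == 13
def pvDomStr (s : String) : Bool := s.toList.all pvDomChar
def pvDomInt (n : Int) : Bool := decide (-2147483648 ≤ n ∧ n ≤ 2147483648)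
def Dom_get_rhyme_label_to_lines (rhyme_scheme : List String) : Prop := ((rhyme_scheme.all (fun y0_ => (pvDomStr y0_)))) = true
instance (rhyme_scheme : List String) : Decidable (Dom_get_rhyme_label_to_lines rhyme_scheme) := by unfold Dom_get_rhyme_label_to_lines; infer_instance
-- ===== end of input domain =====

-- B replaces A's incremental dict-insert/append pass by a per-label construction (dedup the
-- labels in first-occurrence order, then one enumerate-scan per distinct label): an alternative
-- decomposition of the same grouping, not faster (O(k*n) vs A's O(n)).

-- ===== PORT A =====
-- A, line for line: labels = {}; for i in range(len): setdefault-style insert then append.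
def get_rhyme_label_to_lines (rhyme_scheme : List String) : List (String × List Int) :=
  ((PySem.List.pyRange 0 rhyme_scheme.length 1).foldl (fun labels i =>
      let label := PySem.List.pyGetD rhyme_scheme i ""  -- index from range(len) is always valid
      let labels := if labels.contains label then labels else labels.insert label ([] : List Int)
      labels.modify label [] (· ++ [i]))
    PySem.Dict.empty).items

-- ===== PORT B =====
-- B: {label: [i for i, x in enumerate(rs) if x == label] for label in dict.fromkeys(rs)}
def get_rhyme_label_to_lines_alt (rhyme_scheme : List String) : List (String × List Int) :=
  (PySem.List.dedup rhyme_scheme).map (fun label =>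
    (label, (PySem.List.enumerate rhyme_scheme).filterMap
      (fun p => if p.2 = label then some p.1 else none)))

-- ===== PRECONDITION & SPEC =====
def Spec_get_rhyme_label_to_lines (rhyme_scheme : List String) (out : List (String × List Int)) : Prop := out = get_rhyme_label_to_lines_alt rhyme_scheme
instance (rhyme_scheme : List String) (out : List (String × List Int)) : Decidable (Spec_get_rhyme_label_to_lines rhyme_scheme out) := by unfold Spec_get_rhyme_label_to_lines; infer_instance

-- ===== CLAIM (what is proved, stated in full; the proofs are below) =====
def Claim_equal_get_rhyme_label_to_lines : Prop := ∀ (rhyme_scheme : List String), Dom_get_rhyme_label_to_lines rhyme_scheme → Spec_get_rhyme_label_to_lines rhyme_scheme (get_rhyme_label_to_lines rhyme_scheme)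

-- ===== LEMMAS AND PROOFS =====

-- A's conditional "insert empty then append" step is exactly a `modify` step.
theorem pvStep_eq_modify (d : PySem.Dict String (List Int)) (k : String) (i : Int) :
    (if d.contains k then d else d.insert k ([] : List Int)).modify k [] (· ++ [i])
      = d.modify k [] (· ++ [i]) := by
  by_cases h : d.contains k
  · simp [h]
  · have hg : d.getD k ([] : List Int) = [] :=
      PySem.Dict.getD_of_not_contains d [] (by simpa using h)
    simp [h, PySem.Dict.modify, PySem.Dict.getD_insert_self, PySem.Dict.insert_insert_self, hg]

-- B's per-label comprehension over enumerate, rewritten over the swapped (label, index) pairs.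
theorem pvFilterMap_eq_filter_map (l : List (Int × String)) (c : String) :
    l.filterMap (fun p => if p.2 = c then some p.1 else none)
      = ((l.map (fun p => (p.2, p.1))).filter (fun p => p.1 == c)).map (·.2) := by
  induction l with
  | nil => rfl
  | cons p t ih =>
      by_cases h : p.2 = c <;> simp [h, ih]

-- A's whole loop, as a fold of `modify` steps over the swapped enumerate pairs.
theorem pvLoop_eq_foldl_modify (rs : List String) :
    (PySem.List.pyRange 0 rs.length 1).foldl (fun labels i =>
        let label := PySem.List.pyGetD rs i ""
        let labels := if labels.contains label then labels else labels.insert label ([] : List Int)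
        labels.modify label [] (· ++ [i]))
      PySem.Dict.empty
    = ((PySem.List.enumerate rs).map (fun p => (p.2, p.1))).foldl
        (fun d p => d.modify p.1 [] (· ++ [p.2])) PySem.Dict.empty := by
  rw [PySem.List.enumerate_eq_map_pyRange rs "", List.map_map, List.foldl_map]
  exact PySem.List.foldl_congr_mem _ _ _ _ (fun d i _ => pvStep_eq_modify d (PySem.List.pyGetD rs i "") i)

-- ===== VERDICT (by name: the statement is the Claim_ definition above) =====
theorem get_rhyme_label_to_lines_spec : Claim_equal_get_rhyme_label_to_lines := by
  intro rs _
  unfold Spec_get_rhyme_label_to_lines get_rhyme_label_to_lines get_rhyme_label_to_lines_alt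
  rw [pvLoop_eq_foldl_modify]
  set l := (PySem.List.enumerate rs).map (fun p => (p.2, p.1)) with hl
  have hkeys : (l.foldl (fun d p => d.modify p.1 [] (· ++ [p.2])) PySem.Dict.empty).keys
      = PySem.List.dedup rs := by
    rw [PySem.Dict.keys_foldl_modify_key l (·.1) [] (fun _ p v => v ++ [p.2])]
    simp [hl, List.map_map, Function.comp_def, PySem.Dict.keys_empty, PySem.Set.update,
      PySem.List.map_snd_enumerate, PySem.List.dedup_eq_ofList, PySem.Set.ofList_eq_foldl]
  have hnd : (l.foldl (fun d p => d.modify p.1 [] (· ++ [p.2])) PySem.Dict.empty).keys.Nodup := by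
    rw [hkeys]; exact PySem.List.nodup_dedup rs
  rw [PySem.Dict.items_eq_map_keys _ hnd ([] : List Int), hkeys]
  refine List.map_congr_left (fun c _ => ?_)
  rw [PySem.Dict.getD_foldl_modify_append l PySem.Dict.empty c, PySem.Dict.getD_empty,
    List.nil_append, pvFilterMap_eq_filter_map]
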